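-- pv_equiv track=rewrite | github.com/itsachen/CS4740-Project-1 | frequencyTable.py | create_bigram_frequency_table
-- ===== SOURCE A (Python) =====
-- def create_unigram_frequency_table(parsed_list, unk):
--     frequencyTable = {}
--     wordSet = set()
--     for token_list in parsed_list:
--         for token in token_list:
--             if unk and token not in wordSet:
--                 wordSet.add(token)
--                 token = 'UNK'
--             if token in frequencyTable:
--                 frequencyTable[token] += 1
--             else:
--                 frequencyTable[token] = 1
--     return frequencyTable
--
-- def create_bigram_frequency_table(parsed_list, unk):
--     frequencyTable = {}
--     wordSet = set()
--     unigramFreqTable = {}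
--     if unk :
--         unigramFreqTable = create_unigram_frequency_table(parsed_list, False)
--         for token in unigramFreqTable :
--             if unigramFreqTable[token] == 1 :
--                 wordSet.add(token)
--
--     for token_list in parsed_list:
--         token_list_length = len(token_list)
--         for i in range(token_list_length):
--             if i < token_list_length - 1:
--                 current_word = token_list[i]
--                 next_word = token_list[i+1]
--                 if unk and current_word in wordSet:
--                     current_word = 'UNK'
--                 if unk and next_word in wordSet :
--                     next_word = 'UNK'
--                 if current_word in frequencyTable:
--                     if next_word in frequencyTable[current_word]:
--                         frequencyTable[current_word][next_word] += 1
--                     else: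
--                         frequencyTable[current_word][next_word] = 1
--                 else:
--                     frequencyTable[current_word] = {next_word:1}
--     return frequencyTable, wordSet
-- ===== SOURCE B (Python) =====
-- def create_bigram_frequency_table(parsed_list, unk):
--     # declarative recount: no frequency dict is maintained while scanning;
--     # every count is obtained by list.count over comprehension-built lists
--     tokens = [t for tl in parsed_list for t in tl]
--     rare = {w for w in dict.fromkeys(tokens) if tokens.count(w) == 1} if unk else set()
--
--     def rep(w):
--         return 'UNK' if w in rare else w
--
--     pairs = [(rep(a), rep(b)) for tl in parsed_list for a, b in zip(tl, tl[1:])]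
--
--     def inner(c):
--         g = [n for c2, n in pairs if c2 == c]
--         return {n: g.count(n) for n in dict.fromkeys(g)}
--
--     table = {c: inner(c) for c in dict.fromkeys(c for c, _ in pairs)}
--     return table, rare
-- ===== Notes on version B (the rewrite author's own statement) =====
-- stated objective: alternative
-- what changed: B keeps no frequency dictionary while scanning: it materialises the replaced bigram-pair list once and builds the whole result declaratively by comprehensions - the rare set is the distinct words (dict.fromkeys) whose list.count is 1, outer keys are dict.fromkeys of the pairs' first components, each inner dict recounts its per-key group with list.count - whereas A runs a separate unigram-table pass and incrementally mutates a nested dict inside an index loop.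
import Mathlib
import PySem

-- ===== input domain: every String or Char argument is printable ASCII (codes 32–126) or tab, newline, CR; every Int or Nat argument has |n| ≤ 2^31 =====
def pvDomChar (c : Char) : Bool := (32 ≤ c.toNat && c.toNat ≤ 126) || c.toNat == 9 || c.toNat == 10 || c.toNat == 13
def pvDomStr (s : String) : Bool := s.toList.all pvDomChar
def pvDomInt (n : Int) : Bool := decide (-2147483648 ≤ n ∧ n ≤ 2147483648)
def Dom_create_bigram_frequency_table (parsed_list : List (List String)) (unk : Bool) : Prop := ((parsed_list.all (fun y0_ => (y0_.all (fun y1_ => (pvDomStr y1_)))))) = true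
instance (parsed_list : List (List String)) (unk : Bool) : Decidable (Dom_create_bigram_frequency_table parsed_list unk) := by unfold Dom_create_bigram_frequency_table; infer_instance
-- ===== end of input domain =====

-- B builds the whole table declaratively: it materialises the replaced pair list once and obtains
-- every frequency (and the rare-word test) by recounting with List.count over dedup'd keys, instead
-- of A's unigram-table pass plus an index loop mutating a nested dict (alternative, not faster).


-- ===== PORT A =====
def pvUniStep (unk : Bool) (st : PySem.Dict String Int × PySem.Set String) (token0 : String) :
    PySem.Dict String Int × PySem.Set String :=
  let token := if unk && !(PySem.Set.contains st.2 token0) then "UNK" else token0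
  let ws := if unk && !(PySem.Set.contains st.2 token0) then PySem.Set.add st.2 token0 else st.2
  if st.1.contains token then (st.1.insert token (st.1.getD token 0 + 1), ws)
  else (st.1.insert token 1, ws)

def create_unigram_frequency_table (parsed_list : List (List String)) (unk : Bool) :
    PySem.Dict String Int :=
  (parsed_list.foldl (fun st token_list => token_list.foldl (pvUniStep unk) st)
    (PySem.Dict.empty, PySem.Set.empty)).1

def pvBigramStep (unk : Bool) (wordSet : PySem.Set String)
    (ft : PySem.Dict String (PySem.Dict String Int)) (cur0 next0 : String) :
    PySem.Dict String (PySem.Dict String Int) :=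
  let current_word := if unk && PySem.Set.contains wordSet cur0 then "UNK" else cur0
  let next_word := if unk && PySem.Set.contains wordSet next0 then "UNK" else next0
  if ft.contains current_word then
    let inner := ft.getD current_word PySem.Dict.empty
    if inner.contains next_word then
      ft.insert current_word (inner.insert next_word (inner.getD next_word 0 + 1))
    else
      ft.insert current_word (inner.insert next_word 1)
  else
    ft.insert current_word (PySem.Dict.ofList [(next_word, 1)])

def create_bigram_frequency_table (parsed_list : List (List String)) (unk : Bool) :
    (List (String × List (String × Int))) × List String :=
  let wordSet : PySem.Set String :=
    if unk then
      let u := create_unigram_frequency_table parsed_list false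
      u.keys.foldl (fun ws token => if u.getD token 0 == 1 then PySem.Set.add ws token else ws)
        PySem.Set.empty
    else PySem.Set.empty
  let ft := parsed_list.foldl (fun ft token_list =>
      (PySem.List.pyRange 0 (token_list.length : Int) 1).foldl (fun ft i =>
        if i < (token_list.length : Int) - 1 then
          pvBigramStep unk wordSet ft (PySem.List.pyGetD token_list i "")
            (PySem.List.pyGetD token_list (i + 1) "")
        else ft) ft) PySem.Dict.empty
  (ft.items.map (fun p => (p.1, p.2.items)), wordSet)

-- ===== PORT B =====
def create_bigram_frequency_table_alt (parsed_list : List (List String)) (unk : Bool) :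
    (List (String × List (String × Int))) × List String :=
  let tokens := parsed_list.flatMap (fun tl => tl)
  let rare : PySem.Set String :=
    if unk then (PySem.List.dedup tokens).filter (fun w => tokens.count w == 1)
    else PySem.Set.empty
  let rep := fun w => if PySem.Set.contains rare w then "UNK" else w
  let pairs := parsed_list.flatMap (fun tl => (tl.zip tl.tail).map (fun p => (rep p.1, rep p.2)))
  let inner := fun c =>
    let g := (pairs.filter (fun q => q.1 == c)).map (·.2)
    (PySem.List.dedup g).map (fun n => (n, (g.count n : Int)))
  let table := (PySem.List.dedup (pairs.map (·.1))).map (fun c => (c, inner c))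
  (table, rare)

-- ===== PRECONDITION & SPEC =====
def Spec_create_bigram_frequency_table (parsed_list : List (List String)) (unk : Bool) (out : (List (String × List (String × Int))) × List String) : Prop := out = create_bigram_frequency_table_alt parsed_list unk
instance (parsed_list : List (List String)) (unk : Bool) (out : (List (String × List (String × Int))) × List String) : Decidable (Spec_create_bigram_frequency_table parsed_list unk out) := by unfold Spec_create_bigram_frequency_table; infer_instance

-- ===== CLAIM (what is proved, stated in full; the proofs are below) =====
def Claim_equal_create_bigram_frequency_table : Prop := ∀ (parsed_list : List (List String)) (unk : Bool), Dom_create_bigram_frequency_table parsed_list unk → Spec_create_bigram_frequency_table parsed_list unk (create_bigram_frequency_table parsed_list unk)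

-- ===== LEMMAS AND PROOFS =====

-- a fold that leaves the second component of a pair state alone
theorem pv_foldl_pair {α δ β : Type} (l : List α) (f : δ → α → δ) (st : δ × β) :
    l.foldl (fun st x => (f st.1 x, st.2)) st = (l.foldl f st.1, st.2) := by
  induction l generalizing st with
  | nil => rfl
  | cons x xs ih => simp [List.foldl_cons, ih]

-- A's unigram table with unk=False is the counter of the flattened token stream.
theorem pv_unigram_eq_counter (parsed_list : List (List String)) :
    create_unigram_frequency_table parsed_list false =
      PySem.Dict.counter (parsed_list.flatMap (fun tl => tl)) := by
  unfold create_unigram_frequency_table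
  have hstep : ∀ (st : PySem.Dict String Int × PySem.Set String) (t : String),
      pvUniStep false st t = ((fun c t => c.insert t (c.getD t 0 + 1)) st.1 t, st.2) := by
    intro st t
    by_cases h : st.1.contains t
    · simp [pvUniStep, h]
    · simp only [Bool.not_eq_true] at h
      simp [pvUniStep, h, PySem.Dict.getD_of_not_contains _ _ h]
  have hinner : ∀ (st : PySem.Dict String Int × PySem.Set String) (tl : List String),
      tl.foldl (pvUniStep false) st =
        (tl.foldl (fun c t => c.insert t (c.getD t 0 + 1)) st.1, st.2) := by
    intro st tl
    rw [PySem.List.foldl_congr_mem tl (pvUniStep false)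
      (fun st x => ((fun c t => c.insert t (c.getD t 0 + 1)) st.1 x, st.2)) st
      (fun acc x _ => hstep acc x)]
    exact pv_foldl_pair tl (fun c t => c.insert t (c.getD t 0 + 1)) st
  rw [PySem.List.foldl_congr_mem parsed_list _
    (fun st tl => ((fun c tl' => tl'.foldl (fun c t => c.insert t (c.getD t 0 + 1)) c) st.1 tl, st.2))
    _ (fun acc x _ => hinner acc x)]
  rw [pv_foldl_pair]
  dsimp only
  exact Eq.trans List.foldl_flatMap.symm
    (PySem.Dict.foldl_insert_getD_add_one_eq_counter _)

-- a filtered set-accumulating fold over a nodup list appends exactly the filtered elements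
theorem pv_filter_fold (p : String → Bool) :
    ∀ (L : List String) (s : PySem.Set String), L.Nodup → (∀ x ∈ L, x ∉ s) →
    L.foldl (fun ws t => if p t then PySem.Set.add ws t else ws) s = s ++ L.filter p := by
  intro L
  induction L with
  | nil => intro s _ _; simp
  | cons a t ih =>
    intro s hnd hdisj
    have hna : a ∉ s := hdisj a (List.mem_cons_self ..)
    have hnd' := (List.nodup_cons.mp hnd).2
    have hat := (List.nodup_cons.mp hnd).1
    by_cases hp : p a
    · have hadd : PySem.Set.add s a = s ++ [a] := by
        simp [PySem.Set.add, PySem.Set.contains, hna]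
      simp only [List.foldl_cons, hp, if_true, hadd]
      rw [ih (s ++ [a]) hnd' (fun x hx => by
        simp only [List.mem_append, List.mem_singleton, not_or]
        exact ⟨hdisj x (List.mem_cons_of_mem _ hx), fun he => hat (he ▸ hx)⟩)]
      simp [hp]
    · have hp' : p a = false := by simpa using hp
      simp only [List.foldl_cons, hp', Bool.false_eq_true, if_false]
      rw [ih s hnd' (fun x hx => hdisj x (List.mem_cons_of_mem _ hx))]
      simp [hp']

-- A's rare-word set is the dedup'd token stream filtered by count == 1
theorem pv_wordset_eq (tokens : List String) :
    (PySem.Dict.counter tokens).keys.foldl (fun ws token =>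
        if (PySem.Dict.counter tokens).getD token 0 == 1 then PySem.Set.add ws token else ws)
        PySem.Set.empty =
      (PySem.List.dedup tokens).filter (fun w => tokens.count w == 1) := by
  have hkeys : (PySem.Dict.counter tokens).keys = PySem.List.dedup tokens := by
    rw [PySem.Dict.keys_counter, PySem.List.dedup_eq_ofList]
  rw [hkeys]
  have := pv_filter_fold (fun token => (PySem.Dict.counter tokens).getD token 0 == 1)
    (PySem.List.dedup tokens) PySem.Set.empty (PySem.List.nodup_dedup tokens) (by simp [PySem.Set.empty])
  rw [this]
  show (PySem.List.dedup tokens).filter _ = _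
  apply List.filter_congr
  intro x _
  rw [PySem.Dict.getD_counter]
  simp

-- the guarded Nat-range loop visits exactly the adjacent pairs (the zip)
theorem pv_range_loop_eq_zip {γ : Type} (g : γ → String → String → γ) :
    ∀ (tl : List String) (init : γ),
    (List.range tl.length).foldl (fun acc k =>
        if k + 1 < tl.length then g acc (tl.getD k "") (tl.getD (k + 1) "") else acc) init =
      (tl.zip tl.tail).foldl (fun acc p => g acc p.1 p.2) init := by
  intro tl
  induction tl with
  | nil => intro init; rfl
  | cons x xs ih =>
    intro init
    simp only [List.length_cons]
    rw [List.range_succ_eq_map, List.foldl_cons, List.foldl_map]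
    cases xs with
    | nil => simp
    | cons y ys =>
      rw [if_pos (show 0 + 1 < (y :: ys).length + 1 by simp)]
      have hb : ∀ (acc : γ) (k : ℕ),
          (if Nat.succ k + 1 < (y :: ys).length + 1 then
            g acc ((x :: y :: ys).getD (Nat.succ k) "")
              ((x :: y :: ys).getD (Nat.succ k + 1) "")
          else acc) =
          (if k + 1 < (y :: ys).length then
            g acc ((y :: ys).getD k "") ((y :: ys).getD (k + 1) "") else acc) := by
        intro acc k
        rw [show (x :: y :: ys).getD (Nat.succ k) "" = (y :: ys).getD k "" from rfl,
          show (x :: y :: ys).getD (Nat.succ k + 1) "" = (y :: ys).getD (k + 1) "" from rfl]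
        exact if_congr (by omega) rfl rfl
      refine Eq.trans (PySem.List.foldl_congr_mem _ _
        (fun acc k => if k + 1 < (y :: ys).length then
          g acc ((y :: ys).getD k "") ((y :: ys).getD (k + 1) "") else acc)
        _ (fun acc k _ => hb acc k)) ?_
      exact ih (g init x y)

-- A's guarded index loop visits exactly the adjacent pairs (the zip).
theorem pv_index_loop_eq_zip {γ : Type} (g : γ → String → String → γ) (tl : List String)
    (init : γ) :
    (PySem.List.pyRange 0 (tl.length : Int) 1).foldl (fun acc i =>
        if i < (tl.length : Int) - 1 then
          g acc (PySem.List.pyGetD tl i "") (PySem.List.pyGetD tl (i + 1) "")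
        else acc) init =
      (tl.zip tl.tail).foldl (fun acc p => g acc p.1 p.2) init := by
  have hr : PySem.List.pyRange 0 (tl.length : Int) 1 =
      (List.range tl.length).map (fun k : ℕ => (k : Int)) := by
    rw [PySem.List.pyRange_one]
    simp
  rw [hr, List.foldl_map]
  rw [PySem.List.foldl_congr_mem (List.range tl.length) _
    (fun acc k => if k + 1 < tl.length then g acc (tl.getD k "") (tl.getD (k + 1) "") else acc)
    init ?hb]
  · exact pv_range_loop_eq_zip g tl init
  case hb =>
    intro acc k _
    have e1 : PySem.List.pyGetD tl ((k : Int)) "" = tl.getD k "" := PySem.List.pyGetD_natCast tl k ""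
    have e2 : PySem.List.pyGetD tl ((k : Int) + 1) "" = tl.getD (k + 1) "" := by
      rw [show ((k : Int) + 1) = (((k + 1 : ℕ)) : Int) from by push_cast; ring]
      exact PySem.List.pyGetD_natCast tl (k + 1) ""
    rw [e1, e2]
    exact if_congr (by omega) rfl rfl

-- get?/getD/contains on a canonical (key, value-of-key) map
theorem pv_get?_mk_map {ν : Type} (outer : List String) (g : String → ν) (c : String) :
    (PySem.Dict.mk (outer.map (fun c' => (c', g c')))).get? c =
      if c ∈ outer then some (g c) else none := by
  induction outer with
  | nil => simp [show PySem.Dict.mk ([] : List (String × ν)) = PySem.Dict.empty from rfl]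
  | cons a t ih =>
    simp only [List.map_cons]
    rw [PySem.Dict.get?_mk_cons]
    rcases eq_or_ne a c with h | h
    · subst h; simp
    · rw [if_neg (by simp [h]), ih]
      by_cases hc : c ∈ t
      · rw [if_pos hc, if_pos (List.mem_cons_of_mem _ hc)]
      · rw [if_neg hc, if_neg (by simp [List.mem_cons, hc]; exact fun hh => h hh.symm)]

theorem pv_getD_mk_map {ν : Type} (outer : List String) (g : String → ν) (c : String) (d0 : ν) :
    (PySem.Dict.mk (outer.map (fun c' => (c', g c')))).getD c d0 =
      if c ∈ outer then g c else d0 := by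
  rw [PySem.Dict.getD_eq_get?_getD, pv_get?_mk_map]
  by_cases hc : c ∈ outer <;> simp [hc]

theorem pv_contains_mk_map {ν : Type} (outer : List String) (g : String → ν) (c : String) :
    (PySem.Dict.mk (outer.map (fun c' => (c', g c')))).contains c = decide (c ∈ outer) := by
  rw [PySem.Dict.contains_eq_isSome_get?, pv_get?_mk_map]
  by_cases hc : c ∈ outer <;> simp [hc]

-- dedup of a snoc
theorem pv_dedup_append {α : Type} [BEq α] [LawfulBEq α] (xs : List α) (x : α) :
    PySem.List.dedup (xs ++ [x]) =
      if x ∈ xs then PySem.List.dedup xs else PySem.List.dedup xs ++ [x] := by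
  have hc : (PySem.Set.ofList xs).contains x = decide (x ∈ xs) := by
    by_cases hx : x ∈ xs <;>
      simp [PySem.Set.contains, hx, PySem.Set.mem_ofList]
  rw [show PySem.List.dedup (xs ++ [x]) = PySem.Set.ofList (xs ++ [x]) from
    PySem.List.dedup_eq_ofList _, PySem.Set.ofList_eq_foldl, List.foldl_append, List.foldl_cons,
    List.foldl_nil, ← PySem.Set.ofList_eq_foldl]
  show PySem.Set.add (PySem.Set.ofList xs) x = _
  unfold PySem.Set.add
  rw [hc]
  by_cases hx : x ∈ xs <;> simp [hx, PySem.List.dedup_eq_ofList]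

-- the canonical value of the nested table after a stream of (current, next) pairs
def pvInner (qs : List (String × String)) (c : String) : PySem.Dict String Int :=
  PySem.Dict.counter ((qs.filter (fun q => q.1 == c)).map (·.2))

def pvCanon (qs : List (String × String)) : PySem.Dict String (PySem.Dict String Int) :=
  PySem.Dict.mk ((PySem.List.dedup (qs.map (·.1))).map (fun c => (c, pvInner qs c)))

-- A's nested step in uniform form
def pvNStep (ft : PySem.Dict String (PySem.Dict String Int)) (c n : String) :
    PySem.Dict String (PySem.Dict String Int) :=
  ft.insert c
    ((ft.getD c PySem.Dict.empty).insert n ((ft.getD c PySem.Dict.empty).getD n 0 + 1))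

theorem pv_bigramStep_eq (unk : Bool) (ws : PySem.Set String)
    (ft : PySem.Dict String (PySem.Dict String Int)) (cur0 next0 : String) :
    pvBigramStep unk ws ft cur0 next0 =
      pvNStep ft (if unk && PySem.Set.contains ws cur0 then "UNK" else cur0)
        (if unk && PySem.Set.contains ws next0 then "UNK" else next0) := by
  unfold pvBigramStep pvNStep
  set c := if unk && PySem.Set.contains ws cur0 then "UNK" else cur0
  set n := if unk && PySem.Set.contains ws next0 then "UNK" else next0
  by_cases h1 : ft.contains c
  · by_cases h2 : (ft.getD c PySem.Dict.empty).contains n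
    · simp [h1, h2]
    · simp only [Bool.not_eq_true] at h2
      simp [h1, h2, PySem.Dict.getD_of_not_contains _ _ h2]
  · simp only [Bool.not_eq_true] at h1
    simp only [h1, Bool.false_eq_true, if_false]
    rw [PySem.Dict.getD_of_not_contains _ _ h1]
    rw [show (PySem.Dict.empty : PySem.Dict String Int).getD n 0 = 0 from
      PySem.Dict.getD_of_not_contains _ _ (PySem.Dict.contains_empty n), zero_add]
    rfl

-- A's nested fold builds the canonical table
theorem pv_nested_eq_canon (qs : List (String × String)) :
    qs.foldl (fun ft q => pvNStep ft q.1 q.2) PySem.Dict.empty = pvCanon qs := by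
  induction qs using List.reverseRecOn with
  | nil => rfl
  | append_singleton qs p ih =>
    rw [List.foldl_append, List.foldl_cons, List.foldl_nil, ih]
    obtain ⟨c, n⟩ := p
    show pvNStep (pvCanon qs) c n = pvCanon (qs ++ [(c, n)])
    have hinner_c : pvInner (qs ++ [(c, n)]) c =
        (pvInner qs c).insert n ((pvInner qs c).getD n 0 + 1) := by
      unfold pvInner
      rw [show (qs ++ [(c, n)]).filter (fun q => q.1 == c) =
          qs.filter (fun q => q.1 == c) ++ [(c, n)] from by simp [List.filter_append]]
      rw [List.map_append, List.map_cons, List.map_nil, PySem.Dict.counter_append_singleton]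
      rfl
    have hinner_ne : ∀ c', c' ≠ c → pvInner (qs ++ [(c, n)]) c' = pvInner qs c' := by
      intro c' hne
      unfold pvInner
      have hcc : ¬ (c = c') := fun hh => hne hh.symm
      rw [show (qs ++ [(c, n)]).filter (fun q => q.1 == c') =
          qs.filter (fun q => q.1 == c') from by simp [List.filter_append, hcc]]
    unfold pvNStep pvCanon
    rw [pv_getD_mk_map]
    by_cases hc : c ∈ PySem.List.dedup (qs.map (·.1))
    · have hmemq : c ∈ qs.map (·.1) := (PySem.List.mem_dedup _ c).mp hc
      have houter' : PySem.List.dedup ((qs ++ [(c, n)]).map (·.1)) =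
          PySem.List.dedup (qs.map (·.1)) := by
        rw [List.map_append, List.map_cons, List.map_nil, pv_dedup_append, if_pos hmemq]
      rw [houter', if_pos hc]
      apply PySem.Dict.ext
      rw [PySem.Dict.items_insert_of_contains _ _
        (by rw [pv_contains_mk_map]; simpa using hc)]
      show ((PySem.List.dedup (qs.map (·.1))).map
          (fun c' => (c', pvInner qs c'))).map _ = _
      rw [List.map_map]
      apply List.map_congr_left
      intro c' _
      by_cases h' : c' = c
      · subst h'
        simp only [Function.comp_apply, beq_self_eq_true, if_true]
        rw [hinner_c.symm]
      · simp only [Function.comp_apply]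
        rw [if_neg (by simpa using h'), hinner_ne c' h']
    · have hmemq : c ∉ qs.map (·.1) := fun hh => hc ((PySem.List.mem_dedup _ c).mpr hh)
      have houter' : PySem.List.dedup ((qs ++ [(c, n)]).map (·.1)) =
          PySem.List.dedup (qs.map (·.1)) ++ [c] := by
        rw [List.map_append, List.map_cons, List.map_nil, pv_dedup_append, if_neg hmemq]
      rw [houter', if_neg hc]
      have hfe : qs.filter (fun q => q.1 == c) = [] :=
        List.filter_eq_nil_iff.mpr (fun q hq => by
          simp only [beq_iff_eq]
          intro he
          exact hmemq (List.mem_map.mpr ⟨q, hq, he⟩))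
      have hlast : pvInner (qs ++ [(c, n)]) c =
          PySem.Dict.empty.insert n (PySem.Dict.empty.getD n 0 + 1) := by
        unfold pvInner
        rw [show (qs ++ [(c, n)]).filter (fun q => q.1 == c) = [(c, n)] from by
          simp [List.filter_append, hfe]]
        rfl
      apply PySem.Dict.ext
      rw [PySem.Dict.items_insert_of_not_contains _ _
        (by rw [pv_contains_mk_map]; simpa using hc)]
      show ((PySem.List.dedup (qs.map (·.1))).map (fun c' => (c', pvInner qs c'))) ++ _ = _
      rw [List.map_append, List.map_cons, List.map_nil]
      congr 1
      · apply List.map_congr_left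
        intro c' hc'
        have h' : c' ≠ c := fun hh => hc (hh ▸ hc')
        rw [hinner_ne c' h']
      · rw [hlast]

-- the canonical table rendered as nested lists is B's recount-by-comprehension table
theorem pv_canon_items (qs : List (String × String)) :
    (pvCanon qs).items.map (fun p => (p.1, p.2.items)) =
      (PySem.List.dedup (qs.map (·.1))).map (fun c =>
        (c, (PySem.List.dedup ((qs.filter (fun q => q.1 == c)).map (·.2))).map
            (fun n => (n, (((qs.filter (fun q => q.1 == c)).map (·.2)).count n : Int))))) := by
  show ((PySem.List.dedup (qs.map (·.1))).map (fun c => (c, pvInner qs c))).map _ = _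
  rw [List.map_map]
  apply List.map_congr_left
  intro c _
  simp only [Function.comp_apply]
  congr 1
  unfold pvInner
  rw [PySem.Dict.items_counter]
  rw [show (PySem.Set.ofList ((qs.filter (fun q => q.1 == c)).map (·.2)) : List String) =
      PySem.List.dedup ((qs.filter (fun q => q.1 == c)).map (·.2)) from
    (PySem.List.dedup_eq_ofList _).symm]

-- the two ports agree
theorem pv_main (parsed_list : List (List String)) (unk : Bool) :
    create_bigram_frequency_table parsed_list unk =
      create_bigram_frequency_table_alt parsed_list unk := by
  unfold create_bigram_frequency_table create_bigram_frequency_table_alt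
  dsimp only
  set tokens := parsed_list.flatMap (fun tl => tl) with htok
  have hws : (if unk then
      let u := create_unigram_frequency_table parsed_list false
      u.keys.foldl (fun ws token => if u.getD token 0 == 1 then PySem.Set.add ws token else ws)
        PySem.Set.empty
    else PySem.Set.empty) =
      (if unk then (PySem.List.dedup tokens).filter (fun w => tokens.count w == 1)
       else PySem.Set.empty) := by
    cases unk
    · rfl
    · simp only [if_true]
      rw [pv_unigram_eq_counter, ← htok]
      exact pv_wordset_eq tokens
  rw [hws]
  set rare : PySem.Set String :=
    (if unk then (PySem.List.dedup tokens).filter (fun w => tokens.count w == 1)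
     else PySem.Set.empty) with hrare
  have hrep : ∀ w, (if unk && PySem.Set.contains rare w then "UNK" else w) =
      (if PySem.Set.contains rare w then "UNK" else w) := by
    intro w
    cases unk
    · rw [hrare]
      simp [PySem.Set.contains, PySem.Set.empty]
    · rw [Bool.true_and]
  set rep : String → String := fun w => if PySem.Set.contains rare w then "UNK" else w
    with hrepdef
  set P : List (String × String) := parsed_list.flatMap (fun tl => tl.zip tl.tail) with hP
  have hpairs : parsed_list.flatMap
      (fun tl => (tl.zip tl.tail).map (fun p => (rep p.1, rep p.2))) =
      P.map (fun p => (rep p.1, rep p.2)) := by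
    rw [hP, List.map_flatMap]
  have hA : parsed_list.foldl (fun ft token_list =>
      (PySem.List.pyRange 0 (token_list.length : Int) 1).foldl (fun ft i =>
        if i < (token_list.length : Int) - 1 then
          pvBigramStep unk rare ft (PySem.List.pyGetD token_list i "")
            (PySem.List.pyGetD token_list (i + 1) "")
        else ft) ft) PySem.Dict.empty = pvCanon (P.map (fun p => (rep p.1, rep p.2))) := by
    calc parsed_list.foldl (fun ft token_list =>
        (PySem.List.pyRange 0 (token_list.length : Int) 1).foldl (fun ft i =>
          if i < (token_list.length : Int) - 1 then
            pvBigramStep unk rare ft (PySem.List.pyGetD token_list i "")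
              (PySem.List.pyGetD token_list (i + 1) "")
          else ft) ft) PySem.Dict.empty
        = parsed_list.foldl (fun ft tl => (tl.zip tl.tail).foldl
            (fun ft p => pvBigramStep unk rare ft p.1 p.2) ft) PySem.Dict.empty := by
          apply PySem.List.foldl_congr_mem
          intro acc tl _
          exact pv_index_loop_eq_zip (pvBigramStep unk rare) tl acc
      _ = P.foldl (fun ft p => pvBigramStep unk rare ft p.1 p.2) PySem.Dict.empty :=
          List.foldl_flatMap.symm
      _ = P.foldl (fun ft p => pvNStep ft (rep p.1) (rep p.2)) PySem.Dict.empty := by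
          apply PySem.List.foldl_congr_mem
          intro acc p _
          rw [pv_bigramStep_eq unk rare acc p.1 p.2, hrep p.1, hrep p.2]
      _ = (P.map (fun p => (rep p.1, rep p.2))).foldl (fun ft q => pvNStep ft q.1 q.2)
            PySem.Dict.empty := by rw [List.foldl_map]
      _ = pvCanon (P.map (fun p => (rep p.1, rep p.2))) := pv_nested_eq_canon _
  rw [hA, hpairs, pv_canon_items]

-- ===== VERDICT (by name: the statement is the Claim_ definition above) =====
theorem create_bigram_frequency_table_spec : Claim_equal_create_bigram_frequency_table := by
  intro parsed_list unk _
  exact pv_main parsed_list unk
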